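-- pv_equiv track=rewrite | github.com/danielesisinni/Progetto_TWEB-IUM | Python/main.py | generazione_finestre
-- ===== SOURCE A (Python) =====
-- def generazione_finestre(matrice, formato_finestra):
--     altezza, larghezza = len(matrice), len(matrice[0])
--     finestra_a, finestra_l = formato_finestra
--
--     #Generazione di righe e colonne
--     for y in range(altezza - finestra_a + 1):
--         #Genera Lista di matrici per y in range
--         yield [
--             #una porzione di riga in una porzione della matrice
--             [riga[x:x + finestra_l] for riga in matrice[y:y + finestra_a]]
--             for x in range(larghezza - finestra_l + 1)
--         ]
-- ===== SOURCE B (Python) =====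
-- def generazione_finestre(matrice, formato_finestra):
--     altezza, larghezza = len(matrice), len(matrice[0])
--     finestra_a, finestra_l = formato_finestra
--     ny = altezza - finestra_a + 1
--     if ny <= 0:
--         return  # no window rows: nothing to yield, skip building the table
--     nx = larghezza - finestra_l + 1
--     # Phase 1: table of all horizontal slices per row
--     slices = [[riga[x:x + finestra_l] for x in range(nx)] for riga in matrice]
--     # Phase 2: vertical grouping — slice the table into a band, transpose by x
--     for y in range(ny):
--         band = slices[y:y + finestra_a]
--         yield [[srow[x] for srow in band] for x in range(nx)]
-- ===== Notes on version B (the rewrite author's own statement) =====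
-- stated objective: alternative
-- what changed: B first builds a table of every row's horizontal slices, then produces each window band by slicing that table and transposing it by column, instead of A's per-window slice-on-demand of the matrix rows.
-- outside the precondition, e.g. on generazione_finestre([], (1, 1)): A raises IndexError, B raises IndexError
import Mathlib
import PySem

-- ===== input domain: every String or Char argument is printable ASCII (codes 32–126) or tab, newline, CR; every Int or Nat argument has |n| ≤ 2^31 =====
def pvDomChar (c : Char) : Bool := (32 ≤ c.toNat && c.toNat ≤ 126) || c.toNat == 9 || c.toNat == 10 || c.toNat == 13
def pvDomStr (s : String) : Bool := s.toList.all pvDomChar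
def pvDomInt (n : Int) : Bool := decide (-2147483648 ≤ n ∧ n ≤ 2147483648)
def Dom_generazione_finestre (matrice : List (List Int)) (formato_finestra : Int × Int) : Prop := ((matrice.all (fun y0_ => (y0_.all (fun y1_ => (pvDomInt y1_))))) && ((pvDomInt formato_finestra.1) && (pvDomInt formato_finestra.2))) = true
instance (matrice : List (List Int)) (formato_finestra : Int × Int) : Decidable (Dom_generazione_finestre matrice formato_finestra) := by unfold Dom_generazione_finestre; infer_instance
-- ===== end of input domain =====

-- B precomputes a table of every row's horizontal slices once and then groups bands vertically
-- (table-first decomposition; same return value; no speed claim).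

-- ===== PORT A =====
-- A is a generator; its port returns the list of yielded values.
def generazione_finestre (matrice : List (List Int)) (formato_finestra : Int × Int) : List (List (List (List Int))) :=
  let altezza : Int := matrice.length
  -- matrice[0]: Pre_ guarantees matrice ≠ [] (Python raises IndexError there)
  let larghezza : Int := (PySem.List.pyGetD matrice 0 ([] : List Int)).length
  let finestra_a := formato_finestra.1
  let finestra_l := formato_finestra.2
  (PySem.List.pyRange 0 (altezza - finestra_a + 1) 1).map (fun y =>
    (PySem.List.pyRange 0 (larghezza - finestra_l + 1) 1).map (fun x =>
      (PySem.List.slice matrice (some y) (some (y + finestra_a))).map (fun riga =>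
        PySem.List.slice riga (some x) (some (x + finestra_l)))))

-- ===== PORT B =====
def generazione_finestre_alt (matrice : List (List Int)) (formato_finestra : Int × Int) : List (List (List (List Int))) :=
  let altezza : Int := matrice.length
  let larghezza : Int := (PySem.List.pyGetD matrice 0 ([] : List Int)).length
  let finestra_a := formato_finestra.1
  let finestra_l := formato_finestra.2
  let ny : Int := altezza - finestra_a + 1
  if ny ≤ 0 then []  -- no window rows: nothing to yield, skip building the table
  else
    let nx : Int := larghezza - finestra_l + 1
    -- Phase 1: table of all horizontal slices per row
    let slices : List (List (List Int)) :=
      matrice.map (fun riga =>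
        (PySem.List.pyRange 0 nx 1).map (fun x => PySem.List.slice riga (some x) (some (x + finestra_l))))
    -- Phase 2: slice the table into a band per y, transpose by x
    (PySem.List.pyRange 0 ny 1).map (fun y =>
      let band := PySem.List.slice slices (some y) (some (y + finestra_a))
      (PySem.List.pyRange 0 nx 1).map (fun x =>
        band.map (fun srow => PySem.List.pyGetD srow x ([] : List Int))))

-- ===== PRECONDITION & SPEC =====
-- Pre_ excludes only the empty matrix, on which A (and B) raise IndexError at matrice[0].
def Pre_generazione_finestre (matrice : List (List Int)) (_formato_finestra : Int × Int) : Prop := matrice ≠ []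
instance (matrice : List (List Int)) (formato_finestra : Int × Int) : Decidable (Pre_generazione_finestre matrice formato_finestra) := by unfold Pre_generazione_finestre; infer_instance

def pvWitness_generazione_finestre : List (List Int) × (Int × Int) := ([[1, 2, 3], [4, 5, 6]], (2, 2))

def Spec_generazione_finestre (matrice : List (List Int)) (formato_finestra : Int × Int) (out : List (List (List (List Int)))) : Prop := out = generazione_finestre_alt matrice formato_finestra
instance (matrice : List (List Int)) (formato_finestra : Int × Int) (out : List (List (List (List Int)))) : Decidable (Spec_generazione_finestre matrice formato_finestra out) := by unfold Spec_generazione_finestre; infer_instance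

-- ===== CLAIM (what is proved, stated in full; the proofs are below) =====
def Claim_equal_generazione_finestre : Prop := ∀ (matrice : List (List Int)) (formato_finestra : Int × Int), Dom_generazione_finestre matrice formato_finestra → Pre_generazione_finestre matrice formato_finestra → Spec_generazione_finestre matrice formato_finestra (generazione_finestre matrice formato_finestra)

-- ===== LEMMAS AND PROOFS =====

-- slicing commutes with map (both sides clamp with the same length since map preserves length)
theorem pv_slice_map {α β : Type} (f : α → β) (xs : List α) (a b : Int) :
    PySem.List.slice (xs.map f) (some a) (some b) = (PySem.List.slice xs (some a) (some b)).map f := by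
  simp [PySem.List.slice, List.map_drop, List.map_take]

-- ===== VERDICT =====
theorem generazione_finestre_spec : Claim_equal_generazione_finestre := by
  intro matrice ff _ _
  unfold Spec_generazione_finestre generazione_finestre generazione_finestre_alt
  by_cases hny : (matrice.length : Int) - ff.1 + 1 ≤ 0
  · simp [hny, PySem.List.pyRange_one_eq_nil hny]
  simp only [if_neg hny]
  apply List.map_congr_left
  intro y _
  apply List.map_congr_left
  intro x hx
  rw [pv_slice_map, List.map_map]
  apply List.map_congr_left
  intro riga _
  have hx' := (PySem.List.mem_pyRange_one).1 hx
  simp only [Function.comp]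
  exact (PySem.List.pyGetD_map_pyRange_of_nonneg (fun x => PySem.List.slice riga (some x) (some (x + ff.2))) _ x ([] : List Int) hx'.1 hx'.2).symm
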